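-- pv_equiv track=rewrite | github.com/BakedSoups/NextSteamGame | db_creation/canon_pipeline/tag_loader.py | filter_counters_by_seed_tags
-- ===== SOURCE A (Python) =====
-- from collections import Counter
-- from typing import Dict, Iterator, Sequence
--
-- def normalize_tag_text(tag: str) -> str:
--     return tag.strip().lower().replace("_", " ").replace("-", " ")
--
-- def filter_counters_by_seed_tags(counters: Dict[str, Counter], seed_tags: Sequence[str]) -> Dict[str, Counter]:
--     if not seed_tags:
--         return counters
--
--     normalized_seeds = [normalize_tag_text(tag) for tag in seed_tags if tag.strip()]
--     filtered: Dict[str, Counter] = {}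
--     for context, counter in counters.items():
--         matching = Counter()
--         for tag, count in counter.items():
--             normalized_tag = normalize_tag_text(tag)
--             if any(seed in normalized_tag for seed in normalized_seeds):
--                 matching[tag] = count
--         if matching:
--             filtered[context] = matching
--     return filtered
-- ===== SOURCE B (Python) =====
-- def normalize_tag_text(tag):
--     return tag.strip().lower().replace("_", " ").replace("-", " ")
--
--
-- def filter_counters_by_seed_tags(counters, seed_tags):
--     if not seed_tags:
--         return counters
--
--     # minimal seed set: a seed that contains an already-kept seed can never
--     # match a tag the kept seed misses, so drop it
--     seeds = []
--     for raw in seed_tags: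
--         if raw.strip():
--             s = normalize_tag_text(raw)
--             if not any(t in s for t in seeds):
--                 seeds.append(s)
--
--     # decide each distinct tag string once, across all contexts
--     matching_tags = {
--         tag
--         for counter in counters.values()
--         for tag in counter
--         if any(s in normalize_tag_text(tag) for s in seeds)
--     }
--
--     out = {}
--     for context, counter in counters.items():
--         kept = {tag: n for tag, n in counter.items() if tag in matching_tags}
--         if kept:
--             out[context] = kept
--     return out
-- ===== Notes on version B (the rewrite author's own statement) =====
-- stated objective: alternative
-- what changed: B first shrinks the seed list to a minimal set (dropping every normalized seed that contains an already-kept seed), then decides all tags in one flattening pass that builds the set of matching tag strings, and finally filters each counter by set membership, instead of A's per-context per-tag scan over the full seed list with Counter accumulation.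
import Mathlib
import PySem

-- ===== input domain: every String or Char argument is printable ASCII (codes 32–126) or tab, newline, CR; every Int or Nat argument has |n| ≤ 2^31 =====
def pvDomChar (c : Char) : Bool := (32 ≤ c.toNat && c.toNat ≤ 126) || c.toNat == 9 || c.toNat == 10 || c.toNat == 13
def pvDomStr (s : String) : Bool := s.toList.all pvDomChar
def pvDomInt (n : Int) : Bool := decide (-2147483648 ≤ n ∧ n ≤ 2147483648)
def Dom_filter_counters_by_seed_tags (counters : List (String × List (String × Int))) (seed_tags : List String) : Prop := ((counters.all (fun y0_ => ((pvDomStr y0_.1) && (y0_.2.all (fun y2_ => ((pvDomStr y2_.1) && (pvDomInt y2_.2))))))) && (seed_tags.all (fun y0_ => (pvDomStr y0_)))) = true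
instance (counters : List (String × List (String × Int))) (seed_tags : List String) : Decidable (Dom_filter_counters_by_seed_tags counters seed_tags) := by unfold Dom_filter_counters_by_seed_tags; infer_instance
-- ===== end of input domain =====

-- B shrinks the seed list to a minimal set, precomputes the set of matching tag strings in one
-- flattening pass, and filters each counter by set membership (objective: alternative).
-- Neither program mutates its arguments.

-- ===== PORT A =====
-- helper shared by both Pythons (Source B defines the identical normalize_tag_text)
def normalize_tag_text (tag : String) : String :=
  PySem.Str.replace (PySem.Str.replace (PySem.Str.lower (PySem.Str.strip tag)) "_" " ") "-" " "

def filter_counters_by_seed_tags (counters : List (String × List (String × Int))) (seed_tags : List String) : List (String × List (String × Int)) :=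
  if seed_tags = [] then counters
  else
    let normalized_seeds := (seed_tags.filter (fun t => PySem.Str.strip t ≠ "")).map normalize_tag_text
    let filtered : PySem.Dict String (PySem.Dict String Int) :=
      counters.foldl (fun f p =>
        let matching : PySem.Dict String Int :=
          p.2.foldl (fun m tc =>
            if normalized_seeds.any (fun s => PySem.Str.isIn s (normalize_tag_text tc.1)) then
              m.insert tc.1 tc.2
            else m) PySem.Dict.empty
        if matching.items ≠ [] then f.insert p.1 matching else f) PySem.Dict.empty
    filtered.items.map (fun p => (p.1, p.2.items))

-- ===== PORT B =====
-- Source B's seed-reduction loop: keep a normalized seed only if no kept seed is a substring of it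
def pvReduce (seed_tags : List String) : List (List Char) :=
  seed_tags.foldl (fun acc raw =>
    if PySem.Str.strip raw ≠ "" then
      if acc.any (fun t => PySem.Chars.isIn t (normalize_tag_text raw).toList) then acc
      else acc ++ [(normalize_tag_text raw).toList]
    else acc) []

-- Source B's set comprehension over counters.values(): iterates the contexts, then each counter's
-- tags, keeping the tags some seed matches; the resulting set is used only through membership
def pvMatchSet (counters : List (String × List (String × Int))) (seeds : List (List Char)) : PySem.Set String :=
  PySem.Set.ofList ((counters.flatMap (fun q => q.2.map Prod.fst)).filter
    (fun t => seeds.any (fun s => PySem.Chars.isIn s (normalize_tag_text t).toList)))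

-- the Python builds dicts `out`/`kept` keyed by distinct keys (Pre_ below), so `out[k] = v`
-- is ported as an ordered append — exact on every input admitted by Pre_
def filter_counters_by_seed_tags_alt (counters : List (String × List (String × Int))) (seed_tags : List String) : List (String × List (String × Int)) :=
  if seed_tags = [] then counters
  else
    let seeds := pvReduce seed_tags
    let matching_tags := pvMatchSet counters seeds
    counters.foldl (fun out p =>
      let kept : List (String × Int) := p.2.filter (fun tc => PySem.Set.contains matching_tags tc.1)
      if kept = [] then out else out ++ [(p.1, kept)]) []

-- ===== PRECONDITION & SPEC =====
-- Python's arguments are dicts, whose keys are necessarily distinct; Pre_ only rules out the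
-- association lists with duplicate context keys (or duplicate tag keys inside one counter),
-- which represent no Python input at all.
def Pre_filter_counters_by_seed_tags (counters : List (String × List (String × Int))) (seed_tags : List String) : Prop :=
  (counters.map Prod.fst).Nodup ∧ ∀ p ∈ counters, (p.2.map Prod.fst).Nodup
instance (counters : List (String × List (String × Int))) (seed_tags : List String) : Decidable (Pre_filter_counters_by_seed_tags counters seed_tags) := by unfold Pre_filter_counters_by_seed_tags; infer_instance

def pvWitness_filter_counters_by_seed_tags : (List (String × List (String × Int))) × List String :=
  ([("ctx", [("Rogue_Like", 3), ("puzzle", 1)])], ["rogue like", "x"])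

def Spec_filter_counters_by_seed_tags (counters : List (String × List (String × Int))) (seed_tags : List String) (out : List (String × List (String × Int))) : Prop := out = filter_counters_by_seed_tags_alt counters seed_tags
instance (counters : List (String × List (String × Int))) (seed_tags : List String) (out : List (String × List (String × Int))) : Decidable (Spec_filter_counters_by_seed_tags counters seed_tags out) := by unfold Spec_filter_counters_by_seed_tags; infer_instance

-- ===== CLAIM =====
def Claim_equal_filter_counters_by_seed_tags : Prop := ∀ (counters : List (String × List (String × Int))) (seed_tags : List String), Dom_filter_counters_by_seed_tags counters seed_tags → Pre_filter_counters_by_seed_tags counters seed_tags → Spec_filter_counters_by_seed_tags counters seed_tags (filter_counters_by_seed_tags counters seed_tags)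

-- ===== LEMMAS AND PROOFS =====

theorem pvReduce_subset (L : List String) (acc : List (List Char)) :
    acc ⊆ L.foldl (fun acc raw =>
      if PySem.Str.strip raw ≠ "" then
        if acc.any (fun t => PySem.Chars.isIn t (normalize_tag_text raw).toList) then acc
        else acc ++ [(normalize_tag_text raw).toList]
      else acc) acc := by
  induction L generalizing acc with
  | nil => simp
  | cons a L ih =>
      intro t ht
      refine ih _ ?_
      beta_reduce
      by_cases h1 : PySem.Str.strip a ≠ ""
      · rw [if_pos h1]
        by_cases h2 : (acc.any fun t => PySem.Chars.isIn t (normalize_tag_text a).toList) = true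
        · rw [if_pos h2]; exact ht
        · rw [if_neg h2]; exact List.mem_append_left _ ht
      · rw [if_neg h1]; exact ht

theorem pvReduce_mem (L : List String) (acc : List (List Char)) (t : List Char)
    (ht : t ∈ L.foldl (fun acc raw =>
      if PySem.Str.strip raw ≠ "" then
        if acc.any (fun t => PySem.Chars.isIn t (normalize_tag_text raw).toList) then acc
        else acc ++ [(normalize_tag_text raw).toList]
      else acc) acc) :
    t ∈ acc ∨ ∃ raw ∈ L, PySem.Str.strip raw ≠ "" ∧ t = (normalize_tag_text raw).toList := by
  induction L generalizing acc with
  | nil => exact Or.inl ht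
  | cons a L ih =>
      rcases ih _ ht with h | ⟨raw, hraw, hs', he⟩
      · beta_reduce at h
        by_cases h1 : PySem.Str.strip a ≠ ""
        · rw [if_pos h1] at h
          by_cases h2 : (acc.any fun t => PySem.Chars.isIn t (normalize_tag_text a).toList) = true
          · rw [if_pos h2] at h; exact Or.inl h
          · rw [if_neg h2] at h
            rcases List.mem_append.mp h with h | h
            · exact Or.inl h
            · exact Or.inr ⟨a, List.mem_cons_self .., h1, List.mem_singleton.mp h⟩
        · rw [if_neg h1] at h; exact Or.inl h
      · exact Or.inr ⟨raw, List.mem_cons_of_mem _ hraw, hs', he⟩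

theorem pvReduce_cover (L : List String) (acc : List (List Char)) (raw : String)
    (hmem : raw ∈ L) (hs : PySem.Str.strip raw ≠ "") :
    ∃ t ∈ L.foldl (fun acc raw =>
      if PySem.Str.strip raw ≠ "" then
        if acc.any (fun t => PySem.Chars.isIn t (normalize_tag_text raw).toList) then acc
        else acc ++ [(normalize_tag_text raw).toList]
      else acc) acc, t <:+: (normalize_tag_text raw).toList := by
  induction L generalizing acc with
  | nil => cases hmem
  | cons a L ih =>
      rcases List.mem_cons.mp hmem with rfl | hmem'
      · by_cases hany : (acc.any fun t => PySem.Chars.isIn t (normalize_tag_text raw).toList) = true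
        · rcases List.any_eq_true.mp hany with ⟨u, hu, hin⟩
          refine ⟨u, pvReduce_subset L _ ?_, (PySem.Chars.isIn_iff_infix _ _).mp hin⟩
          beta_reduce
          rw [if_pos hs, if_pos hany]; exact hu
        · refine ⟨(normalize_tag_text raw).toList, pvReduce_subset L _ ?_, List.infix_refl _⟩
          beta_reduce
          rw [if_pos hs, if_neg hany]
          exact List.mem_append_right _ (List.mem_singleton.mpr rfl)
      · exact ih _ hmem'

-- per-tag agreement: A's any-seed substring test equals the same test over the reduced seeds
theorem pvHit_eq (seed_tags : List String) (tag : String) :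
    ((seed_tags.filter (fun t => PySem.Str.strip t ≠ "")).map normalize_tag_text).any
        (fun s => PySem.Str.isIn s (normalize_tag_text tag))
      = (pvReduce seed_tags).any (fun s => PySem.Chars.isIn s (normalize_tag_text tag).toList) := by
  rw [List.any_map, List.any_filter, Bool.eq_iff_iff]
  simp only [Function.comp_def, Bool.and_eq_true, decide_eq_true_eq, List.any_eq_true,
    PySem.Str.isIn_iff_infix, PySem.Chars.isIn_iff_infix]
  constructor
  · rintro ⟨raw, hrawL, hraws, hinf⟩
    rcases pvReduce_cover seed_tags [] raw hrawL hraws with ⟨t, ht, htinf⟩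
    exact ⟨t, ht, htinf.trans hinf⟩
  · rintro ⟨t, ht, hinf⟩
    rcases pvReduce_mem seed_tags [] t ht with h | ⟨raw, hrawL, hraws, he⟩
    · cases h
    · rw [he] at hinf
      exact ⟨raw, hrawL, hraws, hinf⟩

-- membership in the precomputed matching-tag set equals the per-tag test, for tags that occur
theorem pvSet_contains (counters : List (String × List (String × Int)))
    (seeds : List (List Char)) (p : String × List (String × Int)) (tc : String × Int)
    (hp : p ∈ counters) (htc : tc ∈ p.2) :
    PySem.Set.contains (pvMatchSet counters seeds) tc.1
    = seeds.any (fun s => PySem.Chars.isIn s (normalize_tag_text tc.1).toList) := by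
  unfold pvMatchSet
  rw [Bool.eq_iff_iff, PySem.Set.contains_iff, PySem.Set.mem_ofList, List.mem_filter]
  constructor
  · rintro ⟨-, h⟩; exact h
  · intro h
    refine ⟨List.mem_flatMap.mpr ⟨p, hp, List.mem_map.mpr ⟨tc, htc, rfl⟩⟩, h⟩

-- A's inner Counter loop over distinct tag keys builds exactly the filtered item list
theorem pvInner_items (tags : List (String × Int)) (h : String × Int → Bool)
    (hnd : (tags.map Prod.fst).Nodup) :
    (tags.foldl (fun m tc => if h tc then m.insert tc.1 tc.2 else m)
      (PySem.Dict.empty : PySem.Dict String Int)).items = tags.filter h := by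
  rw [PySem.List.foldl_if_eq_foldl_filter]
  have hfresh := PySem.Dict.items_foldl_insert_fresh (tags.filter h) Prod.fst Prod.snd
      (PySem.Dict.empty : PySem.Dict String Int)
      (fun a _ => PySem.Dict.contains_empty _)
      (hnd.sublist (List.Sublist.map Prod.fst List.filter_sublist))
  refine hfresh.trans ?_
  rw [show (PySem.Dict.empty : PySem.Dict String Int).items = [] from rfl, List.nil_append]
  simp

-- A's outer dict loop over distinct context keys is a filter-and-map
set_option maxHeartbeats 1000000 in
theorem pvOuter (counters : List (String × List (String × Int)))
    (h : String × Int → Bool)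
    (h1 : (counters.map Prod.fst).Nodup) (h2 : ∀ p ∈ counters, (p.2.map Prod.fst).Nodup) :
    ((counters.foldl (fun f p =>
        let matching : PySem.Dict String Int :=
          p.2.foldl (fun m tc => if h tc then m.insert tc.1 tc.2 else m) PySem.Dict.empty
        if matching.items ≠ [] then f.insert p.1 matching else f)
      (PySem.Dict.empty : PySem.Dict String (PySem.Dict String Int))).items.map
        (fun p => (p.1, p.2.items)))
    = (counters.filter (fun p => decide (p.2.filter h ≠ []))).map
        (fun p => (p.1, p.2.filter h)) := by
  rw [show (fun (f : PySem.Dict String (PySem.Dict String Int)) (p : String × List (String × Int)) =>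
        let matching : PySem.Dict String Int :=
          p.2.foldl (fun m tc => if h tc then m.insert tc.1 tc.2 else m) PySem.Dict.empty
        if matching.items ≠ [] then f.insert p.1 matching else f)
     = (fun f p =>
        if (p.2.foldl (fun m tc => if h tc then m.insert tc.1 tc.2 else m)
              (PySem.Dict.empty : PySem.Dict String Int)).items ≠ [] then
          f.insert p.1 (p.2.foldl (fun m tc => if h tc then m.insert tc.1 tc.2 else m)
              PySem.Dict.empty)
        else f) from rfl]
  rw [PySem.List.foldl_ite_eq_foldl_filter]
  have hfresh := PySem.Dict.items_foldl_insert_fresh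
      (counters.filter (fun x => decide ((x.2.foldl
        (fun m tc => if h tc then m.insert tc.1 tc.2 else m)
        (PySem.Dict.empty : PySem.Dict String Int)).items ≠ [])))
      Prod.fst
      (fun p => p.2.foldl (fun m tc => if h tc then m.insert tc.1 tc.2 else m)
        (PySem.Dict.empty : PySem.Dict String Int))
      PySem.Dict.empty
      (fun a _ => PySem.Dict.contains_empty _)
      (h1.sublist (List.Sublist.map Prod.fst List.filter_sublist))
  refine Eq.trans (congrArg (List.map (fun p => (p.1, p.2.items))) hfresh) ?_
  rw [show (PySem.Dict.empty : PySem.Dict String (PySem.Dict String Int)).items = []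
      from rfl, List.nil_append, List.map_map]
  have hpred : ∀ p ∈ counters,
      (decide ((p.2.foldl (fun m tc => if h tc then m.insert tc.1 tc.2 else m)
        (PySem.Dict.empty : PySem.Dict String Int)).items ≠ []))
      = (decide (p.2.filter h ≠ [])) := fun p hp => by
    rw [pvInner_items p.2 h (h2 p hp)]
  rw [List.filter_congr hpred]
  refine List.map_congr_left (fun p hp => ?_)
  have hnd2 := h2 p (List.mem_of_mem_filter hp)
  simp only [Function.comp_def, pvInner_items p.2 h hnd2]

-- B's append loop is the same filter-and-map
theorem pvBloop (counters : List (String × List (String × Int)))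
    (hB : String × Int → Bool) :
    counters.foldl (fun out p =>
      let kept := p.2.filter hB
      if kept = [] then out else out ++ [(p.1, kept)]) []
    = (counters.filter (fun p => decide (p.2.filter hB ≠ []))).map
        (fun p => (p.1, p.2.filter hB)) := by
  rw [show (fun (out : List (String × List (String × Int))) (p : String × List (String × Int)) =>
        let kept := p.2.filter hB
        if kept = [] then out else out ++ [(p.1, kept)])
      = (fun out p => if p.2.filter hB ≠ [] then out ++ [(p.1, p.2.filter hB)] else out) from by
    funext out p
    by_cases hk : p.2.filter hB = [] <;> simp [hk]]
  exact (PySem.List.foldl_append_ite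
      (p := fun q : String × List (String × Int) => q.2.filter hB ≠ [])
      (f := fun q => (q.1, q.2.filter hB)) counters []).trans (List.nil_append _)

-- the two filter-and-maps agree: per occurring tag, set membership = A's substring test
theorem pvFilterMap_congr (counters : List (String × List (String × Int)))
    (hA hB : String × Int → Bool)
    (hag : ∀ p ∈ counters, ∀ tc ∈ p.2, hB tc = hA tc) :
    (counters.filter (fun p => decide (p.2.filter hB ≠ []))).map
        (fun p => (p.1, p.2.filter hB))
    = (counters.filter (fun p => decide (p.2.filter hA ≠ []))).map
        (fun p => (p.1, p.2.filter hA)) := by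
  have hfilt : ∀ p ∈ counters, p.2.filter hB = p.2.filter hA :=
    fun p hp => List.filter_congr (hag p hp)
  rw [List.filter_congr (fun p hp => by rw [hfilt p hp])]
  exact List.map_congr_left (fun p hp => by
    rw [hfilt p (List.mem_of_mem_filter hp)])

-- ===== VERDICT =====
theorem filter_counters_by_seed_tags_spec : Claim_equal_filter_counters_by_seed_tags := by
  intro counters seed_tags _hdom hpre
  unfold Spec_filter_counters_by_seed_tags
  by_cases hs : seed_tags = []
  · unfold filter_counters_by_seed_tags filter_counters_by_seed_tags_alt
    rw [if_pos hs, if_pos hs]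
  · obtain ⟨h1, h2⟩ := hpre
    unfold filter_counters_by_seed_tags filter_counters_by_seed_tags_alt
    rw [if_neg hs, if_neg hs]
    refine Eq.trans (pvOuter counters _ h1 h2) ?_
    refine Eq.trans ?_ (pvBloop counters _).symm
    refine (pvFilterMap_congr counters _ _ (fun p hp tc htc => ?_)).symm
    rw [pvSet_contains counters (pvReduce seed_tags) p tc hp htc, pvHit_eq]
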